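-- pv_equiv track=rewrite | github.com/prabodh2/python_exam | Questionmark.py | QuestionsMarks
-- ===== SOURCE A (Python) =====
-- def QuestionsMarks(str):
--     a = 11
--     b = 'false'
--     c = 0
--     for i in str:
--         if i.isdigit():
--             if int(i) + a == 10:
--                 if c != 3:
--                     return 'false'
--             b = 'true'
--             c = 0
--             a = int(i)
--         elif i == '?':
--             c += 1
--     return b
-- ===== SOURCE B (Python) =====
-- def QuestionsMarks(str):
--     # Parse once into (digit_value, count of '?' since previous digit), then scan consecutive pairs.
--     parsed = []
--     q = 0
--     for ch in str:
--         if ch.isdigit():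
--             parsed.append((int(ch), q))
--             q = 0
--         elif ch == '?':
--             q += 1
--     for prev, cur in zip(parsed, parsed[1:]):
--         if prev[0] + cur[0] == 10 and cur[1] != 3:
--             return 'false'
--     return 'true' if parsed else 'false'
-- ===== Notes on version B (the rewrite author's own statement) =====
-- stated objective: alternative
-- what changed: B replaces A's single stateful scan (previous digit, result flag, running question-mark counter, early return) by a parse-then-check decomposition: one pass builds a list of (digit, question-marks-since-previous-digit) pairs, then a second pass over zipped consecutive pairs checks the exactly-three rule.
import Mathlib
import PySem

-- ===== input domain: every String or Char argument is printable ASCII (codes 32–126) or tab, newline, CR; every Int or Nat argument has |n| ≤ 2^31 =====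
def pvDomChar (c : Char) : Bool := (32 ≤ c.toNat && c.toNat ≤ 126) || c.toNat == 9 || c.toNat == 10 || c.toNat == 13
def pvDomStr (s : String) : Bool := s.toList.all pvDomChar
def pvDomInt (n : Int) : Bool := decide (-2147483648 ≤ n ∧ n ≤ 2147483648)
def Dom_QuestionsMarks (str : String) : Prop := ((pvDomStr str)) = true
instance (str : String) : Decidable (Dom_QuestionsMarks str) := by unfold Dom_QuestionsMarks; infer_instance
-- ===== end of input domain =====

-- B parses the string once into (digit, question-marks-since-previous-digit) pairs and then checks
-- consecutive pairs, instead of A's single stateful scan with early return (objective: alternative decomposition).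

-- int(i) for a single character i (in both Pythons it is only applied to characters with i.isdigit()).
def pvDigitVal (c : Char) : Int := (PySem.Int.ofChars? [c]).getD 0

-- ===== PORT A =====
-- A's loop: state a (previous digit, 11 initially), b (result so far), c ('?' counter); early return = returning "false".
def pvALoop : List Char → Int → String → Int → String
  | [], _, b, _ => b
  | i :: rest, a, b, c =>
    if PySem.Chars.isdigit i then
      if pvDigitVal i + a = 10 then
        if c ≠ 3 then "false"
        else pvALoop rest (pvDigitVal i) "true" 0
      else pvALoop rest (pvDigitVal i) "true" 0
    else if i = '?' then pvALoop rest a b (c + 1)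
    else pvALoop rest a b c

def QuestionsMarks (str : String) : String := pvALoop str.toList 11 "false" 0

-- ===== PORT B =====
-- first loop of Source B: build parsed = [(digit value, count of '?' since previous digit), …]
def pvParse : List Char → Int → List (Int × Int)
  | [], _ => []
  | ch :: rest, q =>
    if PySem.Chars.isdigit ch then (pvDigitVal ch, q) :: pvParse rest 0
    else if ch = '?' then pvParse rest (q + 1)
    else pvParse rest q

-- second loop of Source B: for prev, cur in zip(parsed, parsed[1:]); some "false" = early return
def pvPairScan : List ((Int × Int) × (Int × Int)) → Option String
  | [] => none
  | (prev, cur) :: rest =>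
    if prev.1 + cur.1 = 10 ∧ cur.2 ≠ 3 then some "false" else pvPairScan rest

def QuestionsMarks_alt (str : String) : String :=
  let parsed := pvParse str.toList 0
  match pvPairScan (parsed.zip parsed.tail) with
  | some s => s
  | none => if parsed ≠ [] then "true" else "false"

-- ===== PRECONDITION & SPEC =====
def Spec_QuestionsMarks (str : String) (out : String) : Prop := out = QuestionsMarks_alt str
instance (str : String) (out : String) : Decidable (Spec_QuestionsMarks str out) := by unfold Spec_QuestionsMarks; infer_instance

-- ===== CLAIM (what is proved, stated in full; the proofs are below) =====
def Claim_equal_QuestionsMarks : Prop := ∀ (str : String), Dom_QuestionsMarks str → Spec_QuestionsMarks str (QuestionsMarks str)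

-- ===== LEMMAS AND PROOFS =====

-- a digit character's int() value is nonnegative (so 11 + v = 10 is impossible for the initial a = 11)
theorem pvDigitVal_nonneg (c : Char) (h : PySem.Chars.isdigit c = true) : 0 ≤ pvDigitVal c := by
  simp only [PySem.Chars.isdigit, Bool.and_eq_true, decide_eq_true_eq, Char.le_def] at h
  obtain ⟨h0, h9⟩ := h
  have h48 : 48 ≤ c.toNat := h0
  have h57 : c.toNat ≤ 57 := h9
  have hinj : ∀ d : Char, c.toNat = d.toNat → c = d := by
    intro d hd; exact Char.ext (UInt32.toNat_inj.mp hd)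
  interval_cases hcn : c.toNat
  · rw [hinj '0' (by decide)]; decide
  · rw [hinj '1' (by decide)]; decide
  · rw [hinj '2' (by decide)]; decide
  · rw [hinj '3' (by decide)]; decide
  · rw [hinj '4' (by decide)]; decide
  · rw [hinj '5' (by decide)]; decide
  · rw [hinj '6' (by decide)]; decide
  · rw [hinj '7' (by decide)]; decide
  · rw [hinj '8' (by decide)]; decide
  · rw [hinj '9' (by decide)]; decide

-- every value stored by pvParse is a digit value, hence nonnegative
theorem pvParse_nonneg : ∀ (cs : List Char) (q : Int) (p : Int × Int),
    p ∈ pvParse cs q → 0 ≤ p.1 := by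
  intro cs
  induction cs with
  | nil => intro q p hp; simp [pvParse] at hp
  | cons ch rest ih =>
    intro q p hp
    by_cases hd : PySem.Chars.isdigit ch = true
    · simp only [pvParse, hd, if_true, List.mem_cons] at hp
      rcases hp with h | h
      · rw [h]; exact pvDigitVal_nonneg ch hd
      · exact ih 0 p h
    · simp only [pvParse, hd, if_false, Bool.false_eq_true] at hp
      split at hp
      · exact ih (q + 1) p hp
      · exact ih q p hp

-- A's pair check starting from previous digit a, expressed on the parsed list
def pvCheckFrom (a : Int) : List (Int × Int) → Option String
  | [] => none
  | p :: rest => if a + p.1 = 10 ∧ p.2 ≠ 3 then some "false" else pvCheckFrom p.1 rest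

-- A's loop equals: parse the rest (with the current '?' count), check pairs starting from a,
-- and on success return b if no digit was seen, "true" otherwise.
theorem pvALoop_eq_parse : ∀ (cs : List Char) (a : Int) (b : String) (c : Int),
    pvALoop cs a b c =
      match pvCheckFrom a (pvParse cs c) with
      | some s => s
      | none => if pvParse cs c = [] then b else "true" := by
  intro cs
  induction cs with
  | nil => intro a b c; simp [pvALoop, pvParse, pvCheckFrom]
  | cons ch rest ih =>
    intro a b c
    by_cases hd : PySem.Chars.isdigit ch = true
    · simp only [pvALoop, pvParse, hd, if_true]
      by_cases hs : pvDigitVal ch + a = 10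
      · by_cases hc : c ≠ 3
        · simp only [hs, if_true, if_true, pvCheckFrom]
          have : a + pvDigitVal ch = 10 ∧ c ≠ 3 := ⟨by omega, hc⟩
          simp [this]
        · simp only [hs, if_true, hc, if_false]
          rw [ih (pvDigitVal ch) "true" 0]
          have hno : ¬ (a + pvDigitVal ch = 10 ∧ c ≠ 3) := by
            intro h; exact hc h.2
          simp only [pvCheckFrom, hno, if_false]
          cases hchk : pvCheckFrom (pvDigitVal ch) (pvParse rest 0) with
          | some s => simp
          | none => simp
      · simp only [hs, if_false]
        rw [ih (pvDigitVal ch) "true" 0]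
        have hno : ¬ (a + pvDigitVal ch = 10 ∧ c ≠ 3) := by
          intro h; exact hs (by omega)
        simp only [pvCheckFrom, hno, if_false]
        cases hchk : pvCheckFrom (pvDigitVal ch) (pvParse rest 0) with
        | some s => simp
        | none => simp
    · by_cases hq : ch = '?'
      · simp only [pvALoop, pvParse, hq, if_true]
        exact ih a b (c + 1)
      · simp only [pvALoop, pvParse, hd, hq, if_false, Bool.false_eq_true]
        exact ih a b c

-- B's pair scan over zip(parsed, parsed[1:]) equals A's check continuing from the first element
theorem pvCheckFrom_eq_pairScan : ∀ (rest : List (Int × Int)) (p : Int × Int),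
    pvCheckFrom p.1 rest = pvPairScan ((p :: rest).zip rest) := by
  intro rest
  induction rest with
  | nil => intro p; simp [pvCheckFrom, pvPairScan]
  | cons q rs ih =>
    intro p
    simp only [List.zip_cons_cons, pvCheckFrom, pvPairScan]
    by_cases h : p.1 + q.1 = 10 ∧ q.2 ≠ 3
    · simp [h]
    · simp only [h, if_false]
      exact ih q

-- ===== VERDICT (by name: the statement is the Claim_ definition above) =====
theorem QuestionsMarks_spec : Claim_equal_QuestionsMarks := by
  intro str _
  unfold Spec_QuestionsMarks QuestionsMarks QuestionsMarks_alt
  rw [pvALoop_eq_parse]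
  cases hps : pvParse str.toList 0 with
  | nil => simp [pvCheckFrom, pvPairScan]
  | cons p rest =>
    have hp1 : 0 ≤ p.1 := pvParse_nonneg str.toList 0 p (by rw [hps]; exact List.mem_cons_self)
    have hno : ¬ ((11 : Int) + p.1 = 10 ∧ p.2 ≠ 3) := by
      intro h; omega
    simp only [pvCheckFrom, hno, if_false]
    rw [pvCheckFrom_eq_pairScan rest p]
    simp
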